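-- pv_equiv track=rewrite | github.com/lsebah/mutuelles-monitor | scraper/enrichment/pappers_enricher.py | _latest_finances
-- ===== SOURCE A (Python) =====
-- def _latest_finances(finances):
--     """From the Pappers `finances` list, pick the most recent year with at
--     least one of CA / résultat / capitaux propres populated."""
--     if not finances:
--         return None
--     sorted_fin = sorted(finances, key=lambda f: f.get("annee") or 0, reverse=True)
--     for f in sorted_fin:
--         if any(f.get(k) for k in ("chiffre_affaires", "resultat", "capitaux_propres")):
--             return f
--     return None
-- ===== SOURCE B (Python) =====
-- def _latest_finances(finances):
--     """Filter to the entries with at least one populated financial field, then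
--     return the first of them whose year equals the maximum year; no sort."""
--     def year(f):
--         return f.get("annee") or 0
--     valid = [f for f in finances
--              if f.get("chiffre_affaires") or f.get("resultat") or f.get("capitaux_propres")]
--     if not valid:
--         return None
--     m = max(year(f) for f in valid)
--     for f in valid:
--         if year(f) == m:
--             return f
-- ===== Notes on version B (the rewrite author's own statement) =====
-- stated objective: alternative
-- what changed: Replaces the stable descending sort plus first-valid scan by filter-then-max: filter to populated entries, compute the maximum year, and return the first filtered entry attaining it.
import Mathlib
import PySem

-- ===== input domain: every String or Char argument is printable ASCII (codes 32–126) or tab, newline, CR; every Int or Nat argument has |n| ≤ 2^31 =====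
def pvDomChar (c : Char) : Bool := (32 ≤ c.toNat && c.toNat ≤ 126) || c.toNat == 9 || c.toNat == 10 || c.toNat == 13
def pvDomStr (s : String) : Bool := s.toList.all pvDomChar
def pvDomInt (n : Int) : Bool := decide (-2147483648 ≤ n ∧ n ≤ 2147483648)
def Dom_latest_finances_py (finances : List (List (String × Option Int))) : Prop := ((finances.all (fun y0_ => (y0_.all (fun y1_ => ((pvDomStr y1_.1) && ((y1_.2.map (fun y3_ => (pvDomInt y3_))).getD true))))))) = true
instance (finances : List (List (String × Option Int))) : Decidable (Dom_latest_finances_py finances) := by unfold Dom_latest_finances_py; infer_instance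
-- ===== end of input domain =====

-- B replaces A's stable descending sort + first-valid scan by filter-then-max
-- (filter to populated entries, take the maximum year, return the first entry attaining it).

-- ===== PORT A =====
-- truthiness of f.get(k) where the dict's values are Optional[int]
def pvTruthy (v : Option (Option Int)) : Bool :=
  match v with
  | some (some n) => n != 0
  | _ => false

-- any(f.get(k) for k in ("chiffre_affaires", "resultat", "capitaux_propres"))
def pvValid (f : List (String × Option Int)) : Bool :=
  ["chiffre_affaires", "resultat", "capitaux_propres"].any
    (fun k => pvTruthy (PySem.Dict.get? ⟨f⟩ k))

-- f.get("annee") or 0  (A's sort key)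
def pvYear (f : List (String × Option Int)) : Int :=
  match PySem.Dict.get? ⟨f⟩ "annee" with
  | some (some n) => if n != 0 then n else 0
  | _ => 0

def latest_finances_py (finances : List (List (String × Option Int))) : Option (List (String × Option Int)) :=
  if finances = [] then none
  else
    -- sorted(finances, key=lambda f: f.get("annee") or 0, reverse=True); the for-loop
    -- with early return is List.find?
    (PySem.List.sorted finances pvYear true).find? pvValid

-- ===== PORT B =====
-- truthiness of a single f.get(k) in B's or-chain
def pvGetTruthy (f : List (String × Option Int)) (k : String) : Bool :=
  match PySem.Dict.get? ⟨f⟩ k with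
  | some (some n) => n != 0
  | _ => false

-- f.get("chiffre_affaires") or f.get("resultat") or f.get("capitaux_propres")  (as a condition)
def pvValidB (f : List (String × Option Int)) : Bool :=
  pvGetTruthy f "chiffre_affaires" || pvGetTruthy f "resultat" || pvGetTruthy f "capitaux_propres"

-- def year(f): return f.get("annee") or 0   ('x or 0' yields x when x is a nonzero int, else 0 = x anyway)
def pvYearB (f : List (String × Option Int)) : Int :=
  match PySem.Dict.get? ⟨f⟩ "annee" with
  | some (some n) => n
  | _ => 0

def latest_finances_py_alt (finances : List (List (String × Option Int))) : Option (List (String × Option Int)) :=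
  let valid := finances.filter pvValidB
  if valid.isEmpty then none
  else
    -- m = max(year(f) for f in valid); then the for-loop with early return is find?
    match PySem.List.max? (valid.map pvYearB) (fun y => y) with
    | none => none
    | some m => valid.find? (fun f => pvYearB f == m)

-- ===== PRECONDITION & SPEC =====
def Spec_latest_finances_py (finances : List (List (String × Option Int))) (out : Option (List (String × Option Int))) : Prop := out = latest_finances_py_alt finances
instance (finances : List (List (String × Option Int))) (out : Option (List (String × Option Int))) : Decidable (Spec_latest_finances_py finances out) := by unfold Spec_latest_finances_py; infer_instance

-- ===== CLAIM (what is proved, stated in full; the proofs are below) =====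
def Claim_equal_latest_finances_py : Prop := ∀ (finances : List (List (String × Option Int))), Dom_latest_finances_py finances → Spec_latest_finances_py finances (latest_finances_py finances)

-- ===== LEMMAS AND PROOFS =====

-- B's helpers compute A's key/validity
lemma pvValidB_eq (f : List (String × Option Int)) : pvValidB f = pvValid f := by
  simp [pvValidB, pvValid, pvGetTruthy, pvTruthy, List.any, Bool.or_assoc]

lemma pvYearB_eq (f : List (String × Option Int)) : pvYearB f = pvYear f := by
  unfold pvYearB pvYear
  cases h : PySem.Dict.get? (⟨f⟩ : PySem.Dict String (Option Int)) "annee" with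
  | none => rfl
  | some v =>
    cases v with
    | none => rfl
    | some n => by_cases hn : n = 0 <;> simp [hn]

-- the single-scan step both proofs pivot on (proof-only; neither port uses it)
def pvStep (acc : Option (List (String × Option Int) × Int)) (f : List (String × Option Int)) :
    Option (List (String × Option Int) × Int) :=
  if pvValid f then
    match acc with
    | none => some (f, pvYear f)
    | some (_, by_) => if pvYear f > by_ then some (f, pvYear f) else acc
  else acc

def pvBef (a b : List (String × Option Int)) : Bool := decide (pvYear b < pvYear a)

def pvG (s : List (List (String × Option Int))) : Option (List (String × Option Int) × Int) :=
  (s.find? pvValid).map (fun b => (b, pvYear b))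

-- insertBy preserves the descending-key order
lemma pvPairwise_insertBy (x : List (String × Option Int)) (s : List (List (String × Option Int)))
    (h : s.Pairwise (fun a b => pvYear b ≤ pvYear a)) :
    (PySem.List.insertBy pvBef x s).Pairwise (fun a b => pvYear b ≤ pvYear a) := by
  induction s with
  | nil => simp [PySem.List.insertBy]
  | cons y t ih =>
    rcases List.pairwise_cons.mp h with ⟨hy, ht⟩
    by_cases hb : pvBef x y = true
    · have hx : pvYear y < pvYear x := by simpa [pvBef] using hb
      simp only [PySem.List.insertBy, hb, if_pos]
      refine List.pairwise_cons.mpr ⟨?_, h⟩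
      intro z hz
      rcases List.mem_cons.mp hz with rfl | hz
      · exact le_of_lt hx
      · exact le_trans (hy z hz) (le_of_lt hx)
    · have hx : pvYear x ≤ pvYear y := by
        have := (not_iff_not.mpr (by simp [pvBef] : pvBef x y = true ↔ pvYear y < pvYear x)).mp hb
        omega
      simp only [PySem.List.insertBy, hb]
      refine List.pairwise_cons.mpr ⟨?_, ih ht⟩
      intro z hz
      rcases (PySem.List.mem_insertBy pvBef x z t).mp hz with rfl | hz
      · exact hx
      · exact hy z hz

-- how find? interacts with one stable-descending insertion
lemma pvFind_insertBy (x : List (String × Option Int)) (s : List (List (String × Option Int)))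
    (h : s.Pairwise (fun a b => pvYear b ≤ pvYear a)) :
    (PySem.List.insertBy pvBef x s).find? pvValid =
      (if pvValid x then
        match s.find? pvValid with
        | none => some x
        | some b => if pvYear b < pvYear x then some x else some b
      else s.find? pvValid) := by
  induction s with
  | nil =>
    simp only [PySem.List.insertBy, List.find?]
    by_cases hv : pvValid x <;> simp [hv]
  | cons y t ih =>
    rcases List.pairwise_cons.mp h with ⟨hy, ht⟩
    by_cases hb : pvBef x y = true
    · have hx : pvYear y < pvYear x := by simpa [pvBef] using hb
      simp only [PySem.List.insertBy, hb, if_pos]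
      by_cases hv : pvValid x
      · have hfind : ∀ b, (y :: t).find? pvValid = some b → pvYear b ≤ pvYear y := by
          intro b hbmem
          have : b ∈ y :: t := List.mem_of_find?_eq_some hbmem
          rcases List.mem_cons.mp this with rfl | hbt
          · exact le_refl _
          · exact hy b hbt
        cases hf : (y :: t).find? pvValid with
        | none => simp [hv]
        | some b =>
          have hlt : pvYear b < pvYear x := lt_of_le_of_lt (hfind b hf) hx
          simp [List.find?, hv, hlt]
      · have hvx : pvValid x = false := by simpa using hv
        simp [List.find?, hvx]
    · have hx : pvYear x ≤ pvYear y := by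
        have := (not_iff_not.mpr (by simp [pvBef] : pvBef x y = true ↔ pvYear y < pvYear x)).mp hb
        omega
      have hb' : pvBef x y = false := by simpa using hb
      simp only [PySem.List.insertBy, hb', Bool.false_eq_true, if_false]
      by_cases hvy : pvValid y
      · have hnot : ¬ pvYear y < pvYear x := not_lt.mpr hx
        by_cases hv : pvValid x <;> simp [List.find?, hvy, hv, hnot]
      · have hvy' : pvValid y = false := by simpa using hvy
        simp only [List.find?, hvy']
        exact ih ht

-- the fold invariant: the scan over l starting from pvG s equals pvG of A's insertion fold
lemma pvInvariant (l : List (List (String × Option Int))) :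
    ∀ (s : List (List (String × Option Int))),
      s.Pairwise (fun a b => pvYear b ≤ pvYear a) →
      l.foldl pvStep (pvG s) =
        pvG (l.foldl (fun acc x => PySem.List.insertBy pvBef x acc) s) := by
  induction l with
  | nil => intro s _; rfl
  | cons x l ih =>
    intro s hs
    have hstep : pvStep (pvG s) x = pvG (PySem.List.insertBy pvBef x s) := by
      unfold pvStep pvG
      rw [pvFind_insertBy x s hs]
      by_cases hv : pvValid x
      · cases hf : s.find? pvValid with
        | none => simp [hv]
        | some b =>
          by_cases hlt : pvYear b < pvYear x
          · simp [hv, hlt]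
          · simp [hv, hlt]
      · simp [hv]
    simp only [List.foldl_cons, hstep]
    exact ih (PySem.List.insertBy pvBef x s) (pvPairwise_insertBy x s hs)

-- A equals the single scan
lemma pvA_eq_scan (finances : List (List (String × Option Int))) :
    latest_finances_py finances = (finances.foldl pvStep none).map Prod.fst := by
  unfold latest_finances_py
  by_cases hnil : finances = []
  · subst hnil; rfl
  · simp only [hnil, ite_false]
    rw [PySem.List.sorted_rev_eq_foldl_insertBy finances pvYear]
    have : (fun (acc : List (List (String × Option Int))) x =>
        PySem.List.insertBy (fun a b => decide (pvYear b < pvYear a)) x acc) =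
        (fun acc x => PySem.List.insertBy pvBef x acc) := by
      funext acc x; rfl
    rw [this]
    have hinv := pvInvariant finances [] List.Pairwise.nil
    have hG : pvG ([] : List (List (String × Option Int))) = none := rfl
    rw [hG] at hinv
    rw [hinv]
    unfold pvG
    cases List.find? pvValid (List.foldl (fun acc x => PySem.List.insertBy pvBef x acc) [] finances) <;> rfl

-- the running maximum of pvYear over a nonempty filtered list, as B computes it
def pvMax (v : List (List (String × Option Int))) : Int :=
  match v with
  | [] => 0
  | c :: t => (t.map pvYear).foldl max (pvYear c)

lemma pvMax_isMax (v : List (List (String × Option Int))) :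
    ∀ f ∈ v, pvYear f ≤ pvMax v := by
  cases v with
  | nil => intro f hf; cases hf
  | cons c t =>
    intro f hf
    have hmax : PySem.List.max? (pvYear c :: t.map pvYear) (fun y => y) =
        some ((t.map pvYear).foldl max (pvYear c)) := PySem.List.max?_id_cons _ _
    refine PySem.List.max?_isMax hmax (pvYear f) ?_
    rcases List.mem_cons.mp hf with rfl | hft
    · exact List.mem_cons_self
    · exact List.mem_cons_of_mem _ (List.mem_map_of_mem hft)

lemma pvMax_mem (c : List (String × Option Int)) (t : List (List (String × Option Int))) :
    pvMax (c :: t) ∈ (c :: t).map pvYear := by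
  have hmax : PySem.List.max? (pvYear c :: t.map pvYear) (fun y => y) =
      some ((t.map pvYear).foldl max (pvYear c)) := PySem.List.max?_id_cons _ _
  simpa using PySem.List.max?_mem hmax

lemma pvMax_snoc (c : List (String × Option Int)) (t : List (List (String × Option Int)))
    (x : List (String × Option Int)) :
    pvMax (c :: t ++ [x]) = max (pvMax (c :: t)) (pvYear x) := by
  simp [pvMax, List.foldl_append]

-- the scan characterised against B's filter / max / find? decomposition
lemma pvScan_char (l : List (List (String × Option Int))) :
    l.foldl pvStep none =
      ((l.filter pvValid).find? (fun f => pvYear f == pvMax (l.filter pvValid))).map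
        (fun b => (b, pvMax (l.filter pvValid))) := by
  induction l using List.reverseRecOn with
  | nil => rfl
  | append_singleton l x ih =>
    rw [List.foldl_append, List.foldl_cons, List.foldl_nil, ih, List.filter_append]
    by_cases hv : pvValid x
    · simp only [List.filter_cons, hv, if_pos, List.filter_nil]
      cases hvl : l.filter pvValid with
      | nil => simp [pvStep, hv, pvMax]
      | cons c t =>
        -- the maximum is attained, so find? succeeds on the left part
        have hattain : ∃ b ∈ c :: t, (pvYear b == pvMax (c :: t)) = true := by
          rcases List.mem_map.mp (pvMax_mem c t) with ⟨b, hb, hyb⟩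
          exact ⟨b, hb, by simp [hyb]⟩
        rcases List.find?_isSome.mpr (by exact hattain) |> Option.isSome_iff_exists.mp
          with ⟨b, hb⟩
        have hbmem := List.mem_of_find?_eq_some hb
        have hbyear : pvYear b = pvMax (c :: t) := by
          have := List.find?_some hb
          simpa using this
        rw [hb]
        simp only [Option.map_some, pvStep, hv, if_pos]
        by_cases hgt : pvYear x > pvMax (c :: t)
        · -- new maximum: the left find? fails for the new target
          have hmax' : pvMax (c :: t ++ [x]) = pvYear x := by
            rw [pvMax_snoc]; omega
          have hleftnone : (c :: t).find? (fun f => pvYear f == pvMax (c :: t ++ [x])) = none := by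
            rw [List.find?_eq_none]
            intro f hf
            have := pvMax_isMax (c :: t) f hf
            simp only [hmax', beq_iff_eq]
            omega
          rw [show (c :: t ++ [x]) = ((c :: t) ++ [x]) by simp]
          rw [List.find?_append, hleftnone]
          simp [hgt]
          exact hmax'.symm
        · -- old maximum survives: the left find? still yields b
          have hmax' : pvMax (c :: t ++ [x]) = pvMax (c :: t) := by
            rw [pvMax_snoc]; omega
          rw [show (c :: t ++ [x]) = ((c :: t) ++ [x]) by simp]
          rw [List.find?_append, hmax', hb]
          simp [hgt]
    · simp [pvStep, hv]

-- B is exactly the mapped scan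
lemma pvB_eq_scan (finances : List (List (String × Option Int))) :
    latest_finances_py_alt finances = (finances.foldl pvStep none).map Prod.fst := by
  unfold latest_finances_py_alt
  rw [pvScan_char]
  rw [show pvValidB = pvValid from funext pvValidB_eq,
     show pvYearB = pvYear from funext pvYearB_eq]
  cases hvl : finances.filter pvValid with
  | nil => rfl
  | cons c t =>
    have hmax : PySem.List.max? ((c :: t).map pvYear) (fun y => y) = some (pvMax (c :: t)) := by
      simpa [pvMax] using PySem.List.max?_id_cons (pvYear c) (t.map pvYear)
    simp only [List.isEmpty_cons, Bool.false_eq_true, if_false, hmax]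
    cases (c :: t).find? (fun f => pvYear f == pvMax (c :: t)) <;> rfl

-- ===== VERDICT (by name: the statement is the Claim_ definition above) =====
theorem latest_finances_py_spec : Claim_equal_latest_finances_py := by
  intro finances _
  unfold Spec_latest_finances_py
  rw [pvA_eq_scan, pvB_eq_scan]
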